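-- pv_equiv track=rewrite | github.com/yaeeun916/RP-Lab-DL-School-HW | HW1/pair_count.py | pair_count
-- ===== SOURCE A (Python) =====
-- def pair_count(input_list):  #예: input_list=['bcd', 'bce', 'cce']
--     pair_count=0
--     for i in range(len(input_list)):
--         input_list[i]=set(list(input_list[i])) #예: input_list=[{'b', 'c', d'}, {'b', 'c', 'e'}, {'c', 'e'}]
--     for i in input_list:
--         for j in input_list:
--             if i!=j and len(list(i&j))==2: #서로 다른 두 set의 교집합의 원소가 2일 때
--                 pair_count+=1
--             else:
--                 pass
--     pair_count=int(pair_count/2)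
--     return(pair_count) #소수점이 나오지 않도록
-- ===== SOURCE B (Python) =====
-- def _common(x, y):
--     c = 0
--     for ch in x:
--         if ch in y:
--             c += 1
--     return c
--
-- def pair_count(input_list):
--     cnt = {}
--     for s in input_list:
--         k = tuple(sorted(set(s)))
--         cnt[k] = cnt.get(k, 0) + 1
--     total = 0
--     rest = list(cnt.items())
--     while rest:
--         (ka, ca) = rest[0]
--         rest = rest[1:]
--         for kb, cb in rest:
--             if _common(ka, kb) == 2:
--                 total += ca * cb
--     return total
-- ===== Notes on version B (the rewrite author's own statement) =====
-- stated objective: faster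
-- what changed: B builds a dict counting occurrences of each string's sorted distinct-character key in one pass, then sums count products over a triangular scan of the distinct keys whose common-character count is exactly 2, instead of A's full n x n double loop over all (possibly duplicate) sets followed by halving.
import Mathlib
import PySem

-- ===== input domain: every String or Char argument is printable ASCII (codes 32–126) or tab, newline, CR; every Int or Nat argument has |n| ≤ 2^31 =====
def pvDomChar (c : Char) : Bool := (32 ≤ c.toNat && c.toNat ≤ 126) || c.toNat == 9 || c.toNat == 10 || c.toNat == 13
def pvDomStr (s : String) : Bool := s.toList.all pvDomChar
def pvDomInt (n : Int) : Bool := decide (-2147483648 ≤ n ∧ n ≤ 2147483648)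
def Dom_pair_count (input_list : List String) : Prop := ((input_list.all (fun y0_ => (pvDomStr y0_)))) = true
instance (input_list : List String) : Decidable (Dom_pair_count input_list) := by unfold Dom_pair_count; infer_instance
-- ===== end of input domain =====

-- B groups equal character-sets in a dict of counts and sums count products over a triangular
-- scan of the distinct keys (alternative decomposition). A also mutates its argument list in
-- place; B does not — the equivalence proved here is about the return value only.


-- ===== PORT A =====
def pair_count (input_list : List String) : Int :=
  -- first loop: input_list[i] = set(list(input_list[i]))
  let sets : List (PySem.Set Char) := input_list.map (fun s => PySem.Set.ofList s.toList)
  -- nested loops over the rewritten list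
  let c : Int := sets.foldl (fun acc i =>
      sets.foldl (fun acc2 j =>
        if ¬ (PySem.Set.equal i j = true) ∧ PySem.Set.len (PySem.Set.inter i j) = 2
        then acc2 + 1 else acc2) acc) 0
  c / 2  -- int(c/2): c ≥ 0 here, so float-division-then-int is exact integer division

-- ===== PORT B =====
-- _common(x, y): count characters of x that occur in y
def pvCommon (x y : List Char) : Int :=
  x.foldl (fun c ch => if y.contains ch then c + 1 else c) 0

-- the while-loop of Source B: pop the first item, scan the rest
def pvTri : List (List Char × Int) → Int → Int
  | [], total => total
  | (ka, ca) :: rest, total =>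
      pvTri rest (rest.foldl (fun t p => if pvCommon ka p.1 = 2 then t + ca * p.2 else t) total)

def pair_count_alt (input_list : List String) : Int :=
  -- cnt[k] = cnt.get(k, 0) + 1 with k = tuple(sorted(set(s)))
  let cnt : PySem.Dict (List Char) Int :=
    input_list.foldl (fun d s =>
      PySem.Dict.modify d (PySem.List.sorted (PySem.Set.ofList s.toList) (fun x => x) false) 0 (· + 1))
      PySem.Dict.empty
  pvTri cnt.items 0

-- ===== PRECONDITION & SPEC =====
def Spec_pair_count (input_list : List String) (out : Int) : Prop := out = pair_count_alt input_list
instance (input_list : List String) (out : Int) : Decidable (Spec_pair_count input_list out) := by unfold Spec_pair_count; infer_instance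

-- ===== CLAIM (what is proved, stated in full; the proofs are below) =====
def Claim_equal_pair_count : Prop := ∀ (input_list : List String), Dom_pair_count input_list → Spec_pair_count input_list (pair_count input_list)

-- ===== LEMMAS AND PROOFS =====

lemma foldl_if_add {α : Type} (p : α → Prop) [DecidablePred p] (g : α → Int) :
    ∀ (l : List α) (init : Int),
    l.foldl (fun t x => if p x then t + g x else t) init
      = init + (l.map (fun x => if p x then g x else 0)).sum := by
  intro l
  induction l with
  | nil => intro init; simp
  | cons a l ih =>
    intro init
    by_cases h : p a
    · simp only [List.foldl_cons, List.map_cons, List.sum_cons, if_pos h, ih]; ring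
    · simp only [List.foldl_cons, List.map_cons, List.sum_cons, if_neg h, ih]; ring

lemma foldl_shift {α : Type} (f : Int → α → Int) (S : α → Int) (h : ∀ a x, f a x = a + S x) :
    ∀ (l : List α) (init : Int), l.foldl f init = init + (l.map S).sum := by
  intro l
  induction l with
  | nil => intro init; simp
  | cons a l ih => intro init; simp only [List.foldl_cons, List.map_cons, List.sum_cons, h, ih]; ring

lemma sum_indicator {α : Type} (p : α → Bool) (g : α → Int) :
    ∀ l : List α, (l.map (fun x => if p x = true then g x else 0)).sum
      = ((l.filter p).map g).sum := by
  intro l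
  induction l with
  | nil => simp
  | cons a l ih =>
    by_cases h : p a = true
    · simp only [List.map_cons, List.sum_cons, List.filter_cons, h, ih]; simp
    · simp only [List.map_cons, List.sum_cons, if_neg h, List.filter_cons, ih]
      simp [Bool.not_eq_true] at h
      simp [h]

lemma pvCommon_eq_filter_length (x y : List Char) :
    pvCommon x y = ((x.filter (fun ch => y.contains ch)).length : Int) := by
  unfold pvCommon
  rw [foldl_if_add (fun ch => y.contains ch = true) (fun _ => 1) x 0,
      sum_indicator (fun ch => y.contains ch) (fun _ => 1) x]
  simp [List.map_const', List.sum_replicate]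

lemma pvCommon_symm (x y : List Char) (hx : x.Nodup) (hy : y.Nodup) :
    pvCommon x y = pvCommon y x := by
  rw [pvCommon_eq_filter_length, pvCommon_eq_filter_length]
  congr 1
  have : (x.filter (fun ch => y.contains ch)).Perm (y.filter (fun ch => x.contains ch)) := by
    rw [List.perm_ext_iff_of_nodup (hx.filter _) (hy.filter _)]
    intro a; simp [List.mem_filter, and_comm]
  exact this.length_eq

-- canonical key of a string: sorted distinct characters (B's dict key)
def pvCanon (s : String) : List Char :=
  PySem.List.sorted (PySem.Set.ofList s.toList) (fun x => x) false

-- A's pair indicator on sets, B's on canonical keys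
def pvWA (i j : PySem.Set Char) : Int :=
  if ¬ (PySem.Set.equal i j = true) ∧ PySem.Set.len (PySem.Set.inter i j) = 2 then 1 else 0

def pvWB (x y : List Char) : Int :=
  if x ≠ y ∧ pvCommon x y = 2 then 1 else 0

lemma pvCanon_perm (s : String) : (pvCanon s).Perm (PySem.Set.ofList s.toList) :=
  PySem.List.sorted_perm _ _ _

lemma pvCanon_nodup (s : String) : (pvCanon s).Nodup :=
  (pvCanon_perm s).nodup_iff.mpr (PySem.Set.nodup_ofList _)

-- pointwise transfer: A's indicator on (set s, set t) equals B's on (canon s, canon t)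
lemma pvWA_eq_pvWB (s t : String) :
    pvWA (PySem.Set.ofList s.toList) (PySem.Set.ofList t.toList) = pvWB (pvCanon s) (pvCanon t) := by
  set i := PySem.Set.ofList s.toList with hi
  set j := PySem.Set.ofList t.toList with hj
  have heq : (PySem.Set.equal i j = true) ↔ (pvCanon s = pvCanon t) := by
    rw [PySem.Set.equal_iff]
    unfold pvCanon
    rw [← hi, ← hj, PySem.List.sorted_id_eq_sorted_id_iff_perm,
        List.perm_ext_iff_of_nodup (PySem.Set.nodup_ofList _) (PySem.Set.nodup_ofList _)]
  have hlen : PySem.Set.len (PySem.Set.inter i j) = pvCommon (pvCanon s) (pvCanon t) := by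
    rw [pvCommon_eq_filter_length]
    show ((List.filter (fun x => j.contains x) i).length : Int) = _
    congr 1
    apply List.Perm.length_eq
    have hc : (fun x => j.contains x) = (fun ch => (pvCanon t).contains ch) := by
      funext x
      have hm : x ∈ pvCanon t ↔ x ∈ j := (pvCanon_perm t).mem_iff
      by_cases h : x ∈ j <;> simp [hm, h]
    rw [hc]
    exact List.Perm.filter _ (pvCanon_perm s).symm
  have hcond : (¬ (PySem.Set.equal i j = true) ∧ PySem.Set.len (PySem.Set.inter i j) = 2)
      ↔ (pvCanon s ≠ pvCanon t ∧ pvCommon (pvCanon s) (pvCanon t) = 2) := by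
    rw [hlen]
    exact and_congr_left (fun _ => not_congr heq)
  unfold pvWA pvWB
  exact if_congr hcond rfl rfl

-- group a sum over a list by distinct values with multiplicities
lemma sum_group {α : Type} [DecidableEq α] [BEq α] [LawfulBEq α] (C : List α) (F : α → Int) :
    (C.map F).sum = ((PySem.Set.ofList C).map (fun u => (C.count u : Int) * F u)).sum := by
  rw [Finset.sum_list_map_count]
  rw [← List.sum_toFinset _ (PySem.Set.nodup_ofList C)]
  have hfs : (PySem.Set.ofList C).toFinset = C.toFinset := by
    ext a; simp [List.mem_toFinset, PySem.Set.mem_ofList]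
  rw [hfs]
  apply Finset.sum_congr rfl
  intro u _
  rw [nsmul_eq_mul]
  congr 2
  unfold List.count
  apply List.countP_congr
  intro a _
  by_cases h : a = u <;> simp [h]

lemma pvTri_shift : ∀ (l : List (List Char × Int)) (total : Int),
    pvTri l total = total + pvTri l 0 := by
  intro l
  induction l with
  | nil => intro t; simp [pvTri]
  | cons a rest ih =>
    intro t
    obtain ⟨ka, ca⟩ := a
    show pvTri rest _ = t + pvTri rest _
    rw [ih, ih (List.foldl _ 0 rest),
        foldl_if_add (fun p => pvCommon ka p.1 = 2) (fun p => ca * p.2) rest t,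
        foldl_if_add (fun p => pvCommon ka p.1 = 2) (fun p => ca * p.2) rest 0]
    ring

lemma sum_map_add {α : Type} (l : List α) (f g : α → Int) :
    (l.map (fun x => f x + g x)).sum = (l.map f).sum + (l.map g).sum := by
  induction l with
  | nil => simp
  | cons a l ih => simp [ih]; ring

-- the full square over distinct keys equals twice B's triangular loop
lemma square_eq_two_tri (cnt : List Char → Int) :
    ∀ (K : List (List Char)), K.Nodup → (∀ x ∈ K, x.Nodup) →
    (K.map (fun u => (K.map (fun v => cnt u * (cnt v * pvWB u v))).sum)).sum
      = 2 * pvTri (K.map (fun k => (k, cnt k))) 0 := by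
  intro K
  induction K with
  | nil => intro _ _; simp [pvTri]
  | cons u K' ih =>
    intro hnd hel
    have hu : u ∉ K' := (List.nodup_cons.mp hnd).1
    have hnd' : K'.Nodup := (List.nodup_cons.mp hnd).2
    have hel' : ∀ x ∈ K', x.Nodup := fun x hx => hel x (List.mem_cons_of_mem _ hx)
    have hun : u.Nodup := hel u (List.mem_cons_self)
    have hdiag : pvWB u u = 0 := by simp [pvWB]
    set Su : Int := (K'.map (fun v => cnt u * (cnt v * pvWB u v))).sum with hSu
    have hsplit :
        ((u :: K').map (fun x => ((u :: K').map (fun v => cnt x * (cnt v * pvWB x v))).sum)).sum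
        = Su + ((K'.map (fun x => cnt x * (cnt u * pvWB x u))).sum
            + (K'.map (fun x => (K'.map (fun v => cnt x * (cnt v * pvWB x v))).sum)).sum) := by
      simp only [List.map_cons, List.sum_cons, hdiag]
      rw [← sum_map_add]
      simp [hSu]
    have hcol : (K'.map (fun x => cnt x * (cnt u * pvWB x u))).sum = Su := by
      rw [hSu]
      congr 1
      apply List.map_congr_left
      intro x hx
      rw [pvWB, pvWB, pvCommon_symm u x hun (hel' x hx)]
      rw [show (if x ≠ u ∧ pvCommon x u = 2 then (1:Int) else 0)
            = (if u ≠ x ∧ pvCommon x u = 2 then (1:Int) else 0) from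
          if_congr (and_congr_left fun _ => ne_comm) rfl rfl]
      ring
    have hrhs : pvTri ((u :: K').map (fun k => (k, cnt k))) 0
        = Su + pvTri (K'.map (fun k => (k, cnt k))) 0 := by
      simp only [List.map_cons]
      show pvTri (K'.map (fun k => (k, cnt k)))
          ((K'.map (fun k => (k, cnt k))).foldl
            (fun t p => if pvCommon u p.1 = 2 then t + cnt u * p.2 else t) 0) = _
      rw [pvTri_shift,
          foldl_if_add (fun (p : List Char × Int) => pvCommon u p.1 = 2)
            (fun (p : List Char × Int) => cnt u * p.2) (K'.map (fun k => (k, cnt k))) 0]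
      have : ((K'.map (fun k => (k, cnt k))).map
            (fun p => if pvCommon u p.1 = 2 then cnt u * p.2 else 0)).sum = Su := by
        rw [List.map_map, hSu]
        congr 1
        apply List.map_congr_left
        intro v hv
        have huv : u ≠ v := fun h => hu (h ▸ hv)
        simp only [Function.comp]
        by_cases h : pvCommon u v = 2
        · simp [pvWB, h, huv]
        · simp [pvWB, h]
      rw [this]
      ring
    rw [hsplit, hcol, hrhs, ih hnd' hel']
    ring

-- ===== VERDICT (by name: the statement is the Claim_ definition above) =====
theorem pair_count_spec : Claim_equal_pair_count := by
  intro input _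
  show pair_count input = pair_count_alt input
  have houter : ∀ (acc : Int) (i : PySem.Set Char),
      (input.map (fun s => PySem.Set.ofList s.toList)).foldl
        (fun acc2 j => if ¬ (PySem.Set.equal i j = true) ∧ PySem.Set.len (PySem.Set.inter i j) = 2
          then acc2 + 1 else acc2) acc
      = acc + ((input.map (fun s => PySem.Set.ofList s.toList)).map (pvWA i)).sum := by
    intro acc i
    exact foldl_if_add
      (fun j => ¬ (PySem.Set.equal i j = true) ∧ PySem.Set.len (PySem.Set.inter i j) = 2)
      (fun _ => 1) _ acc
  have hA : pair_count input
      = ((input.map pvCanon).map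
          (fun x => ((input.map pvCanon).map (pvWB x)).sum)).sum / 2 := by
    have h0 : pair_count input
        = ((input.map (fun s => PySem.Set.ofList s.toList)).foldl (fun acc i =>
            (input.map (fun s => PySem.Set.ofList s.toList)).foldl
              (fun acc2 j => if ¬ (PySem.Set.equal i j = true) ∧ PySem.Set.len (PySem.Set.inter i j) = 2
               then acc2 + 1 else acc2) acc) 0) / 2 := rfl
    rw [h0, foldl_shift _ _ houter, zero_add]
    congr 1
    rw [List.map_map, List.map_map]
    congr 1
    apply List.map_congr_left
    intro s _
    simp only [Function.comp_apply]
    rw [List.map_map, List.map_map]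
    congr 1
    apply List.map_congr_left
    intro t _
    simp only [Function.comp_apply]
    exact pvWA_eq_pvWB s t
  have hB : pair_count_alt input
      = pvTri ((PySem.Set.ofList (input.map pvCanon)).map
          (fun k => (k, ((input.map pvCanon).count k : Int)))) 0 := by
    have h0 : pair_count_alt input
        = pvTri ((input.foldl (fun d s => PySem.Dict.modify d (pvCanon s) 0 (· + 1))
            PySem.Dict.empty).items) 0 := rfl
    rw [h0]
    have h1 : input.foldl (fun d s => PySem.Dict.modify d (pvCanon s) 0 (· + 1)) PySem.Dict.empty
        = PySem.Dict.counter (input.map pvCanon) := by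
      rw [PySem.Dict.counter_eq_foldl, List.foldl_map]
    rw [h1, PySem.Dict.items_counter]
  rw [hA, hB]
  set C := input.map pvCanon with hC
  have hnodups : ∀ x ∈ PySem.Set.ofList C, x.Nodup := by
    intro x hx
    rw [PySem.Set.mem_ofList, hC] at hx
    obtain ⟨s, _, rfl⟩ := List.mem_map.mp hx
    exact pvCanon_nodup s
  rw [sum_group C (fun x => (C.map (pvWB x)).sum)]
  have hmaps : (PySem.Set.ofList C).map (fun u => (C.count u : Int) * (C.map (pvWB u)).sum)
      = (PySem.Set.ofList C).map (fun u =>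
          ((PySem.Set.ofList C).map (fun v => (C.count u : Int) * ((C.count v : Int) * pvWB u v))).sum) := by
    apply List.map_congr_left
    intro u _
    rw [sum_group C (pvWB u), ← List.sum_map_mul_left]
  rw [hmaps,
      square_eq_two_tri (fun k => (C.count k : Int)) (PySem.Set.ofList C)
        (PySem.Set.nodup_ofList C) hnodups]
  exact Int.mul_ediv_cancel_left _ two_ne_zero
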